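-- pv_equiv track=rewrite | github.com/shyamalmondal2008/mondals2008 | python_programming/missing_number_from_array.py | getMEX
-- ===== SOURCE A (Python) =====
-- def getMEX(a, n):
--     found = [False] * (n + 2)
--     for i in range(n):
--         if a[i] > 0 and a[i] <= n:
--             found[a[i]] = True
--     for i in range(1, n + 2):
--         if found[i] == False:
--             return i
--     return n + 1
-- ===== SOURCE B (Python) =====
-- def getMEX(a, n):
--     # sort a copy of the first n values (positives only), then walk with a counter
--     vals = sorted(v for v in (a[i] for i in range(n)) if v > 0)
--     expected = 1
--     for v in vals:
--         if v == expected: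
--             expected += 1
--         elif v > expected:
--             break
--         # else: duplicate or smaller value, skip
--     return expected
-- ===== Notes on version B (the rewrite author's own statement) =====
-- stated objective: alternative
-- what changed: A allocates an O(n) boolean presence table and scans it; B sorts a copy of the positive values among the first n elements and walks the sorted list with an 'expected' counter, returning the first gap.
-- outside the precondition, e.g. on getMEX([], -1): A returns 0, B returns 1; on getMEX([1], 3): A raises IndexError, B raises IndexError
import Mathlib
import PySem

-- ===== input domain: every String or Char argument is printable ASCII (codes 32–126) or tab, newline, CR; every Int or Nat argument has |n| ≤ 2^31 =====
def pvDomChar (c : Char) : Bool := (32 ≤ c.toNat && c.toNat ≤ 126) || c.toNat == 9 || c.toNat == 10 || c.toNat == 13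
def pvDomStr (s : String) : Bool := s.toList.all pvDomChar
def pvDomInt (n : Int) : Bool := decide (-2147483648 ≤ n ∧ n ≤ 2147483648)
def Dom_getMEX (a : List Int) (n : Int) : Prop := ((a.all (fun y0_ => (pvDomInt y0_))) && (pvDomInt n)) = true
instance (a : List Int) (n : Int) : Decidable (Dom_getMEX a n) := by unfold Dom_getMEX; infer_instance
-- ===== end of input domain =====

-- B replaces A's boolean presence table by sort-a-copy-and-walk with an `expected` counter (alternative algorithm, same result).


-- ===== PORT A =====
-- a[i] / found[i] reads and found[a[i]] = True writes use pyGetD/pySetD, exact under Pre_ (all indices in range there).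
def getMEX (a : List Int) (n : Int) : Int :=
  let found : List Bool :=
    (PySem.List.pyRange 0 n 1).foldl
      (fun f i =>
        let v := PySem.List.pyGetD a i 0
        if 0 < v ∧ v ≤ n then PySem.List.pySetD f v true else f)
      (List.replicate (n + 2).toNat false)
  match (PySem.List.pyRange 1 (n + 2) 1).find?
      (fun i => PySem.List.pyGetD found i true == false) with
  | some i => i
  | none => n + 1

-- ===== PORT B =====
-- the for-loop with break over the sorted values
def mexWalk : List Int → Int → Int
  | [], e => e
  | v :: rest, e =>
    if v = e then mexWalk rest (e + 1)
    else if e < v then e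
    else mexWalk rest e

def getMEX_alt (a : List Int) (n : Int) : Int :=
  let vals : List Int :=
    PySem.List.sorted
      (((PySem.List.pyRange 0 n 1).map (fun i => PySem.List.pyGetD a i 0)).filter
        (fun v => decide (0 < v)))
      (fun x => x) false
  mexWalk vals 1

-- ===== PRECONDITION & SPEC =====
-- Pre_ excludes n > len(a), where A raises IndexError, and negative n, which is outside the
-- natural domain of an (array, count) pair (A returns the meaningless n+1 ≤ 0 there, B returns 1).
def Pre_getMEX (a : List Int) (n : Int) : Prop := 0 ≤ n ∧ n ≤ a.length
instance (a : List Int) (n : Int) : Decidable (Pre_getMEX a n) := by unfold Pre_getMEX; infer_instance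

def pvWitness_getMEX : List Int × Int := ([1, 2, 4], 3)

def Spec_getMEX (a : List Int) (n : Int) (out : Int) : Prop := out = getMEX_alt a n
instance (a : List Int) (n : Int) (out : Int) : Decidable (Spec_getMEX a n out) := by unfold Spec_getMEX; infer_instance

-- ===== CLAIM (what is proved, stated in full; the proofs are below) =====
def Claim_equal_getMEX : Prop := ∀ (a : List Int) (n : Int), Dom_getMEX a n → Pre_getMEX a n → Spec_getMEX a n (getMEX a n)

-- ===== LEMMAS AND PROOFS =====

-- reading a[0..m) by index yields the prefix
lemma prefix_map_getD (a : List Int) (m : Nat) (hm : m ≤ a.length) :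
    (List.range m).map (fun k => a.getD k (0 : Int)) = a.take m := by
  apply List.ext_getElem
  · simp [Nat.min_eq_left hm]
  · intro i h1 h2
    simp only [List.getElem_map, List.getElem_range, List.getElem_take]
    have hi : i < a.length := by simp at h1; omega
    rw [List.getD_eq_getElem _ _ hi]

-- B's walk on a nondecreasing list computes the least j ≥ e not in the list
lemma mexWalk_spec (L : List Int) (hL : L.Pairwise (· ≤ ·)) :
    ∀ e : Int, e ≤ mexWalk L e ∧ mexWalk L e ∉ L ∧
      ∀ j, e ≤ j → j < mexWalk L e → j ∈ L := by
  induction L with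
  | nil =>
    intro e
    refine ⟨le_refl e, List.not_mem_nil, fun j h1 h2 => ?_⟩
    simp [mexWalk] at h2
    omega
  | cons v rest ih =>
    intro e
    have hrest := ih (List.Pairwise.of_cons hL)
    have hv : ∀ y ∈ rest, v ≤ y := (List.pairwise_cons.mp hL).1
    by_cases h1 : v = e
    · subst h1
      have hstep : mexWalk (v :: rest) v = mexWalk rest (v + 1) := by
        simp [mexWalk]
      obtain ⟨hle, hnm, hall⟩ := hrest (v + 1)
      rw [hstep]
      refine ⟨by omega, ?_, ?_⟩
      · intro hmem
        rcases List.mem_cons.mp hmem with h | h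
        · omega
        · exact hnm h
      · intro j hj1 hj2
        by_cases hje : j = v
        · simp [hje]
        · exact List.mem_cons_of_mem _ (hall j (by omega) hj2)
    · by_cases h2 : e < v
      · have hstep : mexWalk (v :: rest) e = e := by
          simp [mexWalk, h1, h2]
        rw [hstep]
        refine ⟨le_refl e, ?_, fun j hj1 hj2 => by omega⟩
        intro hmem
        rcases List.mem_cons.mp hmem with h | h
        · omega
        · have := hv _ h; omega
      · have hstep : mexWalk (v :: rest) e = mexWalk rest e := by
          simp [mexWalk, h1, h2]
        obtain ⟨hle, hnm, hall⟩ := hrest e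
        rw [hstep]
        refine ⟨hle, ?_, fun j hj1 hj2 => List.mem_cons_of_mem _ (hall j hj1 hj2)⟩
        intro hmem
        rcases List.mem_cons.mp hmem with h | h
        · omega
        · exact hnm h

-- pigeonhole: if 1..e-1 all lie in s then e - 1 ≤ |s|
lemma pigeonhole_prefix (s : List Int) (e : Int) (h1 : 1 ≤ e)
    (hall : ∀ j, 1 ≤ j → j < e → j ∈ s) : e - 1 ≤ (s.length : Int) := by
  have hsub : Finset.Icc (1 : Int) (e - 1) ⊆ s.toFinset := by
    intro j hj
    rw [Finset.mem_Icc] at hj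
    exact List.mem_toFinset.mpr (hall j hj.1 (by omega))
  have hcard := Finset.card_le_card hsub
  rw [Int.card_Icc] at hcard
  have h2 := List.toFinset_card_le s
  omega

-- first-hit characterization of find? over a unit-step range
lemma find?_pyRange_eq_some (p : Int → Bool) (hi : Int) :
    ∀ (lo m : Int), lo ≤ m → m < hi → p m = true →
      (∀ j, lo ≤ j → j < m → p j = false) →
      (PySem.List.pyRange lo hi 1).find? p = some m := by
  intro lo m h1 h2 hm hbefore
  have hd : ∀ (d : Nat) (lo : Int), lo ≤ m → m < hi → (m - lo).toNat = d →
      (∀ j, lo ≤ j → j < m → p j = false) →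
      (PySem.List.pyRange lo hi 1).find? p = some m := by
    intro d
    induction d with
    | zero =>
      intro lo h1 h2 hdd hb
      have : lo = m := by omega
      subst this
      rw [PySem.List.pyRange_one_cons (by omega)]
      simp [List.find?, hm]
    | succ k ih =>
      intro lo h1 h2 hdd hb
      rw [PySem.List.pyRange_one_cons (by omega)]
      have hplo : p lo = false := hb lo le_rfl (by omega)
      simp only [List.find?, hplo]
      exact ih (lo + 1) (by omega) h2 (by omega) (fun j hj1 hj2 => hb j (by omega) hj2)
  exact hd (m - lo).toNat lo h1 h2 rfl hbefore

-- the presence table: A's marking fold preserves length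
lemma foldl_mark_length (n : Int) (s : List Int) :
    ∀ F0 : List Bool,
      (s.foldl (fun f v => if 0 < v ∧ v ≤ n then PySem.List.pySetD f v true else f) F0).length
        = F0.length := by
  induction s with
  | nil => intro F0; rfl
  | cons v rest ih =>
    intro F0
    simp only [List.foldl_cons]
    rw [ih]
    split_ifs with h
    · rw [PySem.List.pySetD_of_nonneg _ _ (by omega), List.length_set]
    · rfl

-- the presence table: lookup after A's marking fold
lemma foldl_mark_getD (n : Int) (s : List Int) :
    ∀ (F0 : List Bool) (k : Nat),
      (∀ v ∈ s, 0 < v → v ≤ n → v.toNat < F0.length) →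
      ((s.foldl (fun f v => if 0 < v ∧ v ≤ n then PySem.List.pySetD f v true else f) F0).getD k false = true
        ↔ F0.getD k false = true ∨ ∃ v ∈ s, 0 < v ∧ v ≤ n ∧ v.toNat = k) := by
  induction s with
  | nil => intro F0 k _; simp
  | cons w rest ih =>
    intro F0 k hb
    simp only [List.foldl_cons]
    by_cases hw : 0 < w ∧ w ≤ n
    · rw [if_pos hw, PySem.List.pySetD_of_nonneg _ _ (by omega)]
      have hwlen : w.toNat < F0.length := hb w List.mem_cons_self hw.1 hw.2
      rw [ih (F0.set w.toNat true) k
        (fun v hv h1 h2 => by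
          rw [List.length_set]; exact hb v (List.mem_cons_of_mem _ hv) h1 h2)]
      have hset : (F0.set w.toNat true).getD k false = true
          ↔ F0.getD k false = true ∨ w.toNat = k := by
        rcases eq_or_ne w.toNat k with he | he
        · subst he
          simp [List.getD_eq_getElem?_getD, hwlen]
        · simp [List.getD_eq_getElem?_getD, List.getElem?_set_ne he, he]
      rw [hset]
      constructor
      · rintro (⟨h | h⟩ | ⟨v, hv, h1, h2, h3⟩)
        · exact Or.inl h
        · exact Or.inr ⟨w, List.mem_cons_self, hw.1, hw.2, h⟩
        · exact Or.inr ⟨v, List.mem_cons_of_mem _ hv, h1, h2, h3⟩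
      · rintro (h | ⟨v, hv, h1, h2, h3⟩)
        · exact Or.inl (Or.inl h)
        · rcases List.mem_cons.mp hv with he | hm
          · subst he; exact Or.inl (Or.inr h3)
          · exact Or.inr ⟨v, hm, h1, h2, h3⟩
    · rw [if_neg hw]
      rw [ih F0 k (fun v hv h1 h2 => hb v (List.mem_cons_of_mem _ hv) h1 h2)]
      constructor
      · rintro (h | ⟨v, hv, h1, h2, h3⟩)
        · exact Or.inl h
        · exact Or.inr ⟨v, List.mem_cons_of_mem _ hv, h1, h2, h3⟩
      · rintro (h | ⟨v, hv, h1, h2, h3⟩)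
        · exact Or.inl h
        · rcases List.mem_cons.mp hv with he | hm
          · subst he; exact absurd ⟨h1, h2⟩ hw
          · exact Or.inr ⟨v, hm, h1, h2, h3⟩

theorem getMEX_spec : Claim_equal_getMEX := by
  intro a n _ hpre
  obtain ⟨hn0, hnlen⟩ := hpre
  unfold Spec_getMEX getMEX getMEX_alt
  dsimp only
  have hml : n.toNat ≤ a.length := by omega
  have hrange : PySem.List.pyRange 0 n 1 = List.map (fun k : Nat => (k : Int)) (List.range n.toNat) := by
    rw [PySem.List.pyRange_one]
    exact congrArg₂ List.map (funext fun k => zero_add _) (by norm_num)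
  have hread : ((List.range n.toNat).map (fun k : Nat => (k : Int))).map
      (fun i => PySem.List.pyGetD a i 0) = a.take n.toNat := by
    rw [List.map_map]
    simp only [Function.comp_def, PySem.List.pyGetD_natCast]
    exact prefix_map_getD a n.toNat hml
  -- B's value and its least-gap properties
  set s : List Int := a.take n.toNat with hs
  have hslen : s.length = n.toNat := by simp [hs, hml]
  set vals : List Int :=
    PySem.List.sorted (s.filter (fun v => decide (0 < v))) (fun x => x) false with hvals
  have hmemvals : ∀ j : Int, j ∈ vals ↔ j ∈ s ∧ 0 < j := by
    intro j
    rw [hvals, PySem.List.mem_sorted]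
    simp [List.mem_filter]
  have hpair : vals.Pairwise (· ≤ ·) := by
    simpa using PySem.List.sorted_pairwise (s.filter (fun v => decide (0 < v))) (fun x => x)
  obtain ⟨he1, he2, he3⟩ := mexWalk_spec vals hpair 1
  set e : Int := mexWalk vals 1 with he
  have hes : e ∉ s := fun h => he2 ((hmemvals e).mpr ⟨h, by omega⟩)
  have hins : ∀ j, 1 ≤ j → j < e → j ∈ s :=
    fun j h1 h2 => ((hmemvals j).mp (he3 j h1 h2)).1
  have hecap : e ≤ n + 1 := by
    have := pigeonhole_prefix s e he1 hins
    rw [hslen] at this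
    omega
  -- A's marking fold equals the fold over the prefix s
  have hfold : (PySem.List.pyRange 0 n 1).foldl
      (fun f i =>
        let v := PySem.List.pyGetD a i 0
        if 0 < v ∧ v ≤ n then PySem.List.pySetD f v true else f)
      (List.replicate (n + 2).toNat false)
      = s.foldl (fun f v => if 0 < v ∧ v ≤ n then PySem.List.pySetD f v true else f)
        (List.replicate (n + 2).toNat false) := by
    conv_rhs => rw [hs, ← prefix_map_getD a n.toNat hml]
    rw [hrange, List.foldl_map, List.foldl_map]
    simp only [PySem.List.pyGetD_natCast]
  rw [hfold]
  set F : List Bool :=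
    s.foldl (fun f v => if 0 < v ∧ v ≤ n then PySem.List.pySetD f v true else f)
      (List.replicate (n + 2).toNat false) with hF
  have hFlen : F.length = (n + 2).toNat := by
    rw [hF, foldl_mark_length]
    simp
  have hFget : ∀ j : Int, 1 ≤ j → j ≤ n + 1 →
      (PySem.List.pyGetD F j true = true ↔ j ∈ s ∧ j ≤ n) := by
    intro j hj1 hj2
    have hjlt : (j.toNat : Nat) < F.length := by rw [hFlen]; omega
    rw [PySem.List.pyGetD_eq_getElem F true (by omega) (by rw [hFlen]; push_cast; omega)]
    rw [← List.getD_eq_getElem F false hjlt, hF]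
    rw [foldl_mark_getD n s (List.replicate (n + 2).toNat false) j.toNat
      (fun v _ h1 h2 => by simp only [List.length_replicate]; omega)]
    have hrep : (List.replicate (n + 2).toNat false).getD j.toNat false = false := by
      simp [List.getD]
    rw [hrep]
    constructor
    · rintro (h | ⟨v, hv, h1, h2, h3⟩)
      · exact absurd h (by simp)
      · have : v = j := by omega
        subst this
        exact ⟨hv, h2⟩
    · rintro ⟨hmem, hle⟩
      exact Or.inr ⟨j, hmem, by omega, hle, rfl⟩
  -- the scan over found stops exactly at e
  have hfind : (PySem.List.pyRange 1 (n + 2) 1).find?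
      (fun i => PySem.List.pyGetD F i true == false) = some e := by
    apply find?_pyRange_eq_some _ (n + 2) 1 e he1 (by omega)
    · have hfalse : PySem.List.pyGetD F e true = false := by
        rcases Bool.eq_false_or_eq_true (PySem.List.pyGetD F e true) with h | h
        · exact absurd ((hFget e he1 hecap).mp h).1 hes
        · exact h
      simp [hfalse]
    · intro j hj1 hj2
      have htrue : PySem.List.pyGetD F j true = true :=
        (hFget j hj1 (by omega)).mpr ⟨hins j hj1 hj2, by omega⟩
      simp [htrue]
  rw [hfind, hrange, hread]
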